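-- pv_equiv track=rewrite | github.com/OlegGasul/Leetcode | count-items-matching-a-rule.py | countMatches2
-- ===== SOURCE A (Python) =====
-- from collections import Counter
--
-- def countMatches2(items, ruleKey: str, ruleValue: str) -> int:
--     counters = {
--         "type": Counter(),
--         "color": Counter(),
--         "name": Counter()
--     }
--
--     for item in items:
--         counters["type"][item[0]] += 1
--         counters["color"][item[1]] += 1
--         counters["name"][item[2]] += 1
--
--
--     return counters[ruleKey][ruleValue]
-- ===== SOURCE B (Python) =====
-- def countMatches2(items, ruleKey: str, ruleValue: str) -> int:
--     idx = {"type": 0, "color": 1, "name": 2}[ruleKey]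
--     return sum(item[idx] == ruleValue for item in items)
-- ===== Notes on version B (the rewrite author's own statement) =====
-- stated objective: simpler
-- what changed: Replaces the three Counter tables (one per field) plus a final double lookup with a ruleKey->index map read once and a single targeted count over items.
import Mathlib
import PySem

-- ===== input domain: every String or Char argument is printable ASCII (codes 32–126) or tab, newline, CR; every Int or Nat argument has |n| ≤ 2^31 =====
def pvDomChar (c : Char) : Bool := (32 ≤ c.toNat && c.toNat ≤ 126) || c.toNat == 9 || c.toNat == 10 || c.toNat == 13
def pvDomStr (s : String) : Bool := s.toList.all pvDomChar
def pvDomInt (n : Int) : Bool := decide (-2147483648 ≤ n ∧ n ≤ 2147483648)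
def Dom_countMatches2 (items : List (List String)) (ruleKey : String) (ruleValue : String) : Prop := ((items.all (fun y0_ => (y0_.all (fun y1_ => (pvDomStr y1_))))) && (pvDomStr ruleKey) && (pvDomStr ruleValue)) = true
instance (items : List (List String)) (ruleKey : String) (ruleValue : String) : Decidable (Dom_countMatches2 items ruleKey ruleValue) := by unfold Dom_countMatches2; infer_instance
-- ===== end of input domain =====

-- B replaces A's three Counter tables and final double lookup with a ruleKey->index map read
-- once and a single counting pass over items (simpler; same O(n) cost).


-- ===== PORT A =====
-- A's `counters` dict has the three fixed keys "type"/"color"/"name"; it is carried as a triple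
-- of counters in that key order, and the final `counters[ruleKey]` dict lookup is the if-chain
-- over those keys (the final `else 0` arm is Python's KeyError, excluded by Pre_).
-- `item[j]` is PySem.List.pyGet?; its `.getD ""` default is Python's IndexError, excluded by Pre_.
def countMatches2 (items : List (List String)) (ruleKey : String) (ruleValue : String) : Int :=
  let s := items.foldl
    (fun (s : PySem.Dict String Int × PySem.Dict String Int × PySem.Dict String Int) item =>
      (s.1.modify ((PySem.List.pyGet? item 0).getD "") 0 (· + 1),
       s.2.1.modify ((PySem.List.pyGet? item 1).getD "") 0 (· + 1),
       s.2.2.modify ((PySem.List.pyGet? item 2).getD "") 0 (· + 1)))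
    (PySem.Dict.empty, PySem.Dict.empty, PySem.Dict.empty)
  if ruleKey == "type" then s.1.getD ruleValue 0
  else if ruleKey == "color" then s.2.1.getD ruleValue 0
  else if ruleKey == "name" then s.2.2.getD ruleValue 0
  else 0

-- ===== PORT B =====
-- the `none` arm is Python's KeyError on the index dict, excluded by Pre_;
-- `.getD ""` on item[idx] is Python's IndexError, excluded by Pre_.
def countMatches2_alt (items : List (List String)) (ruleKey : String) (ruleValue : String) : Int :=
  match (PySem.Dict.ofList [("type", (0 : Int)), ("color", 1), ("name", 2)]).get? ruleKey with
  | none => 0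
  | some idx =>
      items.foldl (fun acc item =>
        acc + (if ((PySem.List.pyGet? item idx).getD "") == ruleValue then 1 else 0)) 0

-- ===== PRECONDITION & SPEC =====
-- Pre_ excludes exactly A's exceptions: KeyError on a ruleKey other than the three, and
-- IndexError on any item with fewer than 3 fields.
def Pre_countMatches2 (items : List (List String)) (ruleKey : String) (ruleValue : String) : Prop :=
  (ruleKey = "type" ∨ ruleKey = "color" ∨ ruleKey = "name") ∧ ∀ item ∈ items, 3 ≤ item.length
instance (items : List (List String)) (ruleKey : String) (ruleValue : String) : Decidable (Pre_countMatches2 items ruleKey ruleValue) := by unfold Pre_countMatches2; infer_instance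

def pvWitness_countMatches2 : List (List String) × String × String :=
  ([["phone", "blue", "pixel"], ["phone", "gold", "iphone"]], "color", "blue")

def Spec_countMatches2 (items : List (List String)) (ruleKey : String) (ruleValue : String) (out : Int) : Prop := out = countMatches2_alt items ruleKey ruleValue
instance (items : List (List String)) (ruleKey : String) (ruleValue : String) (out : Int) : Decidable (Spec_countMatches2 items ruleKey ruleValue out) := by unfold Spec_countMatches2; infer_instance

-- ===== CLAIM (what is proved, stated in full; the proofs are below) =====
def Claim_equal_countMatches2 : Prop := ∀ (items : List (List String)) (ruleKey : String) (ruleValue : String), Dom_countMatches2 items ruleKey ruleValue → Pre_countMatches2 items ruleKey ruleValue → Spec_countMatches2 items ruleKey ruleValue (countMatches2 items ruleKey ruleValue)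

-- ===== LEMMAS AND PROOFS =====

-- A's fold over the triple splits into three independent counting folds.
lemma cm_trip_split (items : List (List String))
    (a b c : PySem.Dict String Int) :
    items.foldl
      (fun (s : PySem.Dict String Int × PySem.Dict String Int × PySem.Dict String Int) item =>
        (s.1.modify ((PySem.List.pyGet? item 0).getD "") 0 (· + 1),
         s.2.1.modify ((PySem.List.pyGet? item 1).getD "") 0 (· + 1),
         s.2.2.modify ((PySem.List.pyGet? item 2).getD "") 0 (· + 1))) (a, b, c)
    = (items.foldl (fun d item => d.modify ((PySem.List.pyGet? item 0).getD "") 0 (· + 1)) a,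
       items.foldl (fun d item => d.modify ((PySem.List.pyGet? item 1).getD "") 0 (· + 1)) b,
       items.foldl (fun d item => d.modify ((PySem.List.pyGet? item 2).getD "") 0 (· + 1)) c) := by
  induction items generalizing a b c with
  | nil => rfl
  | cons x xs ih => simp [List.foldl, ih]

-- one field's Counter queried at ruleValue = B's targeted count at that index
lemma cm_field_count (items : List (List String)) (j : Int) (v : String) :
    (items.foldl (fun (d : PySem.Dict String Int) item => d.modify ((PySem.List.pyGet? item j).getD "") 0 (· + 1))
        PySem.Dict.empty).getD v 0
    = items.foldl (fun acc item =>
        acc + (if ((PySem.List.pyGet? item j).getD "") == v then 1 else 0)) 0 := by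
  have hA := PySem.Dict.getD_foldl_modify_add_one
      (items.map (fun item => ((PySem.List.pyGet? item j).getD "" : String)))
      PySem.Dict.empty v
  rw [List.foldl_map] at hA
  rw [hA]
  have hfun : (fun (acc : Int) item =>
        acc + (if ((PySem.List.pyGet? item j).getD "") == v then 1 else 0))
      = (fun (acc : Int) item =>
        if ((PySem.List.pyGet? item j).getD "") == v then acc + 1 else acc) := by
    funext acc item; split <;> omega
  rw [hfun, PySem.List.foldl_count_if]
  simp [List.count_eq_countP, List.countP_map, Function.comp_def]

-- ===== VERDICT (by name: the statement is the Claim_ definition above) =====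
theorem countMatches2_spec : Claim_equal_countMatches2 := by
  intro items ruleKey ruleValue _ hpre
  obtain ⟨hk, _⟩ := hpre
  unfold Spec_countMatches2 countMatches2 countMatches2_alt
  have ht : (PySem.Dict.ofList [("type", (0 : Int)), ("color", 1), ("name", 2)]).get? "type" = some 0 := by decide
  have hc : (PySem.Dict.ofList [("type", (0 : Int)), ("color", 1), ("name", 2)]).get? "color" = some 1 := by decide
  have hn : (PySem.Dict.ofList [("type", (0 : Int)), ("color", 1), ("name", 2)]).get? "name" = some 2 := by decide
  rcases hk with h | h | h <;> subst h <;>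
    simp only [cm_trip_split, ht, hc, hn] <;>
    [rw [if_pos (by decide)];
     rw [if_neg (by decide), if_pos (by decide)];
     rw [if_neg (by decide), if_neg (by decide), if_pos (by decide)]] <;>
    exact cm_field_count items _ ruleValue
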